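-- pv_equiv track=rewrite | github.com/Cesarbautista10/docs_tes1 | generate_docs.py | process_headers
-- ===== SOURCE A (Python) =====
-- def process_headers(content: str) -> str:
--     """Convierte headers markdown a secciones LaTeX"""
--     lines = content.split('\n')
--     processed_lines = []
--
--     for line in lines:
--         # Headers de nivel 1 (capítulos)
--         if line.startswith('# '):
--             title = line[2:].strip()
--             processed_lines.append(f'\\section{{{title}}}')
--             processed_lines.append('\\label{sec:' + title.lower().replace(' ', '-') + '}')
--         # Headers de nivel 2 (secciones)
--         elif line.startswith('## '):
--             title = line[3:].strip()
--             processed_lines.append(f'\\subsection{{{title}}}')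
--             processed_lines.append('\\label{subsec:' + title.lower().replace(' ', '-') + '}')
--         # Headers de nivel 3 (subsecciones)
--         elif line.startswith('### '):
--             title = line[4:].strip()
--             processed_lines.append(f'\\subsubsection{{{title}}}')
--             processed_lines.append('\\label{subsubsec:' + title.lower().replace(' ', '-') + '}')
--         # Headers de nivel 4 (párrafos)
--         elif line.startswith('#### '):
--             title = line[5:].strip()
--             processed_lines.append(f'\\paragraph{{{title}}}')
--         else:
--             processed_lines.append(line)
--
--     return '\n'.join(processed_lines)
-- ===== SOURCE B (Python) =====
-- def _render(line: str) -> str: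
--     # parse: length of the leading '#' run, then a mandatory space
--     h = 0
--     while h < len(line) and line[h] == '#':
--         h += 1
--     if 1 <= h <= 4 and line[h:h + 1] == ' ':
--         title = line[h + 1:].strip()
--         cmd = 'paragraph' if h == 4 else 'sub' * (h - 1) + 'section'
--         res = '\\' + cmd + '{' + title + '}'
--         if h < 4:
--             res += '\n\\label{' + 'sub' * (h - 1) + 'sec:' + title.lower().replace(' ', '-') + '}'
--         return res
--     return line
--
--
-- def process_headers(content: str) -> str:
--     """Convierte headers markdown a secciones LaTeX"""
--     # streaming scanner: peel one line at a time off the raw string, emit directly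
--     out = ''
--     rest = content
--     while True:
--         line, sep, rest = rest.partition('\n')
--         out += _render(line)
--         if not sep:
--             return out
--         out += '\n'
-- ===== Notes on version B (the rewrite author's own statement) =====
-- stated objective: alternative
-- what changed: B replaces A's split-into-lines / four-startswith-branches / list-append / join pipeline by a streaming scanner: a loop that peels one line at a time off the raw string with str.partition at the newline and concatenates rendered output directly, with the LaTeX command and label prefix computed by string repetition from the measured hash-run length instead of branched literals.
import Mathlib
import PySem

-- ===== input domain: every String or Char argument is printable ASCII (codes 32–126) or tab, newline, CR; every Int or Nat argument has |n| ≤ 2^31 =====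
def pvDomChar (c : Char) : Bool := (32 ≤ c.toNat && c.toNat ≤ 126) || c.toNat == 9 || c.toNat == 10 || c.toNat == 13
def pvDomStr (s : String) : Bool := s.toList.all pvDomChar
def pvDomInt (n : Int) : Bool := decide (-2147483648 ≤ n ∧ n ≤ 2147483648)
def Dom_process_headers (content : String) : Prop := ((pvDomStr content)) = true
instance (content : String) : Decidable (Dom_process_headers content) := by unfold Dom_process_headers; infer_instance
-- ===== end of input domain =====

-- B replaces A's split/branch/append/join pipeline by a streaming partition-based scanner that
-- builds the output string directly and computes the LaTeX command names arithmetically (objective: alternative).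

-- ===== PORT A =====
-- per-line body of A's for-loop: the four startswith branches in A's order
def pvProcLineA (line : List Char) : List (List Char) :=
  if PySem.Chars.startswith line "# ".toList then
    let title := PySem.Chars.strip (PySem.List.slice line (some 2) none)   -- line[2:].strip()
    ["\\section{".toList ++ title ++ "}".toList,
     "\\label{sec:".toList ++ PySem.Chars.replace (PySem.Chars.lower title) " ".toList "-".toList ++ "}".toList]
  else if PySem.Chars.startswith line "## ".toList then
    let title := PySem.Chars.strip (PySem.List.slice line (some 3) none)
    ["\\subsection{".toList ++ title ++ "}".toList,
     "\\label{subsec:".toList ++ PySem.Chars.replace (PySem.Chars.lower title) " ".toList "-".toList ++ "}".toList]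
  else if PySem.Chars.startswith line "### ".toList then
    let title := PySem.Chars.strip (PySem.List.slice line (some 4) none)
    ["\\subsubsection{".toList ++ title ++ "}".toList,
     "\\label{subsubsec:".toList ++ PySem.Chars.replace (PySem.Chars.lower title) " ".toList "-".toList ++ "}".toList]
  else if PySem.Chars.startswith line "#### ".toList then
    let title := PySem.Chars.strip (PySem.List.slice line (some 5) none)
    ["\\paragraph{".toList ++ title ++ "}".toList]
  else
    [line]

def process_headers (content : String) : String :=
  let lines := (PySem.Chars.split? content.toList "\n".toList).getD []   -- content.split('\n'); sep ≠ "" so never none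
  let processed := lines.foldl (fun acc line => acc ++ pvProcLineA line) []
  String.ofList (PySem.Chars.join "\n".toList processed)

-- ===== PORT B =====
-- Source B's _render: count the leading '#' run (the while loop), demand a following space,
-- and build the command/label prefix by string repetition 'sub' * (h-1)
def pvRender (line : List Char) : List Char :=
  let h := (line.takeWhile (· == '#')).length
  if 1 ≤ h ∧ h ≤ 4 ∧ PySem.List.slice line (some (h : Int)) (some ((h : Int) + 1)) = [' '] then
    let title := PySem.Chars.strip (PySem.List.slice line (some ((h : Int) + 1)) none)
    let cmd := if h == 4 then "paragraph".toList
               else PySem.List.pyRepeat "sub".toList ((h : Int) - 1) ++ "section".toList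
    let res := '\\' :: (cmd ++ '{' :: (title ++ ['}']))
    if h < 4 then
      res ++ '\n' :: ("\\label{".toList ++ (PySem.List.pyRepeat "sub".toList ((h : Int) - 1) ++
        ("sec:".toList ++ (PySem.Chars.replace (PySem.Chars.lower title) " ".toList "-".toList ++ ['}']))))
    else res
  else line

-- termination helper for the scanner loop (cited in decreasing_by)
lemma pvDropWhile_cons_len {p : Char → Bool} {s rest : List Char} {c : Char}
    (h : s.dropWhile p = c :: rest) : rest.length < s.length := by
  have := List.length_dropWhile_le p s
  rw [h] at this; simp at this; omega

-- Source B's while loop: line, sep, rest = rest.partition('\n'); out += _render(line); stop when no sep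
def pvAltGo (rest : List Char) (out : List Char) : List Char :=
  let line := rest.takeWhile (· != '\n')
  match h : rest.dropWhile (· != '\n') with
  | [] => out ++ pvRender line
  | _ :: rest' => pvAltGo rest' (out ++ pvRender line ++ ['\n'])
termination_by rest.length
decreasing_by exact pvDropWhile_cons_len h

def process_headers_alt (content : String) : String :=
  String.ofList (pvAltGo content.toList [])

-- ===== PRECONDITION & SPEC =====
def Spec_process_headers (content : String) (out : String) : Prop := out = process_headers_alt content
instance (content : String) (out : String) : Decidable (Spec_process_headers content out) := by unfold Spec_process_headers; infer_instance

-- ===== CLAIM =====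
def Claim_equal_process_headers : Prop := ∀ (content : String), Dom_process_headers content → Spec_process_headers content (process_headers content)

-- ===== LEMMAS AND PROOFS =====

-- prepend a prefix to the first piece
def pvConsHead (p : List Char) : List (List Char) → List (List Char)
  | [] => [p]
  | x :: xs => (p ++ x) :: xs

-- reference splitter on '\n', one character at a time (the shape of splitOn.go's recursion)
def pvSplitNL : List Char → List (List Char)
  | [] => [[]]
  | c :: rest => if c = '\n' then [] :: pvSplitNL rest else pvConsHead [c] (pvSplitNL rest)

lemma pvSplitNL_ne_nil (s : List Char) : pvSplitNL s ≠ [] := by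
  induction s with
  | nil => simp [pvSplitNL]
  | cons c rest ih =>
    simp only [pvSplitNL]
    split_ifs
    · simp
    · cases h : pvSplitNL rest with
      | nil => exact absurd h ih
      | cons x xs => simp [pvConsHead]

lemma pvConsHead_nil (xs : List (List Char)) (h : xs ≠ []) : pvConsHead [] xs = xs := by
  cases xs with
  | nil => exact absurd rfl h
  | cons x t => simp [pvConsHead]

lemma pvConsHead_append (a b : List Char) (xs : List (List Char)) (h : xs ≠ []) :
    pvConsHead (a ++ b) xs = pvConsHead a (pvConsHead b xs) := by
  cases xs with
  | nil => exact absurd rfl h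
  | cons x t => simp [pvConsHead]

-- splitOn.go with enough fuel computes pvSplitNL
lemma pvGo_spec (fuel : Nat) (s cur : List Char) (acc : List (List Char)) (hf : s.length < fuel) :
    PySem.Chars.splitOn.go ['\n'] fuel s cur acc = acc.reverse ++ pvConsHead cur.reverse (pvSplitNL s) := by
  induction fuel generalizing s cur acc with
  | zero => omega
  | succ fuel ih =>
    cases s with
    | nil => simp [PySem.Chars.splitOn.go, pvSplitNL, pvConsHead]
    | cons c rest =>
      by_cases hc : c = '\n'
      · subst hc
        have hpre : List.isPrefixOf ['\n'] ('\n' :: rest) = true := by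
          simp [List.isPrefixOf]
        rw [PySem.Chars.splitOn.go]
        simp only [hpre, if_true, List.length_cons, List.drop_succ_cons, List.length_nil, List.drop_zero]
        rw [ih rest [] (cur.reverse :: acc) (by simpa using Nat.lt_of_succ_lt_succ hf)]
        simp only [pvSplitNL, if_pos rfl, pvConsHead, List.reverse_cons, List.append_assoc,
          List.singleton_append, List.nil_append]
        cases hrr : pvSplitNL rest with
        | nil => exact absurd hrr (pvSplitNL_ne_nil rest)
        | cons x xs => simp [pvConsHead]
      · have hpre : List.isPrefixOf ['\n'] (c :: rest) = false := by
          simp [List.isPrefixOf]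
          exact fun e => hc e.symm
        rw [PySem.Chars.splitOn.go]
        simp only [hpre, Bool.false_eq_true, if_false]
        rw [ih rest (c :: cur) acc (by simpa using Nat.lt_of_succ_lt_succ hf)]
        rw [show (c :: cur).reverse = cur.reverse ++ [c] by simp]
        rw [pvConsHead_append _ _ _ (pvSplitNL_ne_nil rest)]
        simp [pvSplitNL, hc]

lemma pvSplitOn_eq (s : List Char) : PySem.Chars.splitOn s ['\n'] = pvSplitNL s := by
  unfold PySem.Chars.splitOn
  rw [pvGo_spec (s.length + 1) s [] [] (by omega)]
  simp [pvConsHead_nil _ (pvSplitNL_ne_nil s)]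

-- join over '\n'
lemma pvJoin_cons (x : List Char) (xs : List (List Char)) (h : xs ≠ []) :
    PySem.Chars.join ['\n'] (x :: xs) = x ++ '\n' :: PySem.Chars.join ['\n'] xs := by
  cases xs with
  | nil => exact absurd rfl h
  | cons y t => simp [PySem.Chars.join, List.intercalate, List.intersperse]

lemma pvJoin_singleton (x : List Char) : PySem.Chars.join ['\n'] [x] = x := by
  simp [PySem.Chars.join, List.intercalate]

lemma pvFlatMap_ne_nil (g : List Char → List (List Char)) (hg : ∀ l, g l ≠ [])
    (x : List Char) (xs : List (List Char)) : (x :: xs).flatMap g ≠ [] := by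
  simp only [List.flatMap_cons, ne_eq, List.append_eq_nil_iff, not_and]
  intro h; exact absurd h (hg x)

lemma pvJoin_append (a b : List (List Char)) (ha : a ≠ []) (hb : b ≠ []) :
    PySem.Chars.join ['\n'] (a ++ b) =
      PySem.Chars.join ['\n'] a ++ '\n' :: PySem.Chars.join ['\n'] b := by
  induction a with
  | nil => exact absurd rfl ha
  | cons x t ih =>
    cases t with
    | nil => simp [pvJoin_singleton, pvJoin_cons _ _ hb]
    | cons y u =>
      rw [List.cons_append, pvJoin_cons _ _ (by simp), pvJoin_cons _ _ (by simp)]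
      rw [ih (by simp)]
      simp

-- joining the flattened per-line pieces = joining the per-line joins (all pieces nonempty)
lemma pvJoinFlat (g : List Char → List (List Char)) (hg : ∀ l, g l ≠ []) (lines : List (List Char)) :
    PySem.Chars.join ['\n'] (lines.flatMap g) =
      PySem.Chars.join ['\n'] (lines.map (fun l => PySem.Chars.join ['\n'] (g l))) := by
  induction lines with
  | nil => rfl
  | cons x t ih =>
    cases t with
    | nil => simp [pvJoin_singleton]
    | cons y u =>
      rw [List.flatMap_cons, pvJoin_append _ _ (hg x) (pvFlatMap_ne_nil g hg y u),
          List.map_cons, pvJoin_cons _ _ (by simp), ih]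

-- the head character of the remainder after the leading '#' run is not '#'
lemma pvDropWhile_head_ne (l : List Char) (c : Char) (t : List Char)
    (h : l.dropWhile (· == '#') = c :: t) : c ≠ '#' := by
  have h2 : l.dropWhile (· == '#') ≠ [] := by simp [h]
  have := List.head_dropWhile_not (· == '#') h2
  simp only [h] at this; simpa using this

-- decomposition of a line into its leading '#' run and the rest
lemma pvLine_decomp (l : List Char) :
    l = List.replicate (l.length - (l.dropWhile (· == '#')).length) '#' ++ l.dropWhile (· == '#') := by
  have ht : l.takeWhile (· == '#') = List.replicate (l.takeWhile (· == '#')).length '#' := by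
    apply List.eq_replicate_of_mem
    intro c hc
    simpa using List.mem_takeWhile_imp hc
  have hlen : (l.takeWhile (· == '#')).length = l.length - (l.dropWhile (· == '#')).length := by
    have h := congrArg List.length (List.takeWhile_append_dropWhile (p := (· == '#')) (l := l))
    rw [List.length_append] at h
    omega
  conv_lhs => rw [← List.takeWhile_append_dropWhile (p := (· == '#')) (l := l)]
  rw [ht, hlen]

-- A's k-th branch pattern is a prefix iff the hash run has length exactly k and a space follows
lemma pvPrefix_iff (n k : Nat) (t : List Char) (h2 : t.head? ≠ some '#') :
    (List.replicate k '#' ++ [' ']) <+: (List.replicate n '#' ++ t) ↔ (n = k ∧ t.head? = some ' ') := by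
  induction k generalizing n with
  | zero =>
    cases n with
    | zero =>
      cases t with
      | nil => simp
      | cons c t' => simp [List.cons_prefix_cons, eq_comm]
    | succ m =>
      simp [List.replicate_succ, List.cons_prefix_cons]
  | succ k ih =>
    cases n with
    | zero =>
      cases t with
      | nil => simp [List.replicate_succ]
      | cons c t' =>
        have hc : c ≠ '#' := by simpa [eq_comm] using h2
        simp [List.replicate_succ, List.cons_prefix_cons, Ne.symm hc]
    | succ m =>
      simp only [List.replicate_succ, List.cons_append, List.cons_prefix_cons]
      rw [ih m]
      constructor
      · rintro ⟨-, h, hs⟩; exact ⟨by omega, hs⟩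
      · rintro ⟨h, hs⟩; exact ⟨trivial, by omega, hs⟩

-- the leading hash run of 'replicate n '#' ++ t' has length n when t does not start with '#'
lemma pvTakeWhile_hash (n : Nat) (t : List Char) (h2 : t.head? ≠ some '#') :
    (List.replicate n '#' ++ t).takeWhile (· == '#') = List.replicate n '#' := by
  induction n with
  | zero =>
    cases t with
    | nil => simp
    | cons c t' =>
      have hc : c ≠ '#' := fun e => h2 (by simp [e])
      simp [List.takeWhile, hc]
  | succ m ih => simpa [List.replicate_succ, List.takeWhile] using ih

-- B's render of a line equals the '\n'-join of A's per-line pieces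
lemma pvProc_aux (n : Nat) (t : List Char) (h2 : t.head? ≠ some '#') :
    PySem.Chars.join ['\n'] (pvProcLineA (List.replicate n '#' ++ t)) =
      pvRender (List.replicate n '#' ++ t) := by
  have hA : ∀ k, (PySem.Chars.startswith (List.replicate n '#' ++ t) (List.replicate k '#' ++ [' ']) = true)
      ↔ (n = k ∧ t.head? = some ' ') :=
    fun k => (PySem.Chars.startswith_iff _ _).trans (pvPrefix_iff n k t h2)
  have b1 : (PySem.Chars.startswith (List.replicate n '#' ++ t) "# ".toList = true) ↔ (n = 1 ∧ t.head? = some ' ') := by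
    rw [show ("# ".toList : List Char) = List.replicate 1 '#' ++ [' '] by decide] at *; exact hA 1
  have b2 : (PySem.Chars.startswith (List.replicate n '#' ++ t) "## ".toList = true) ↔ (n = 2 ∧ t.head? = some ' ') := by
    rw [show ("## ".toList : List Char) = List.replicate 2 '#' ++ [' '] by decide] at *; exact hA 2
  have b3 : (PySem.Chars.startswith (List.replicate n '#' ++ t) "### ".toList = true) ↔ (n = 3 ∧ t.head? = some ' ') := by
    rw [show ("### ".toList : List Char) = List.replicate 3 '#' ++ [' '] by decide] at *; exact hA 3
  have b4 : (PySem.Chars.startswith (List.replicate n '#' ++ t) "#### ".toList = true) ↔ (n = 4 ∧ t.head? = some ' ') := by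
    rw [show ("#### ".toList : List Char) = List.replicate 4 '#' ++ [' '] by decide] at *; exact hA 4
  unfold pvProcLineA pvRender
  rw [pvTakeWhile_hash n t h2]
  simp only [List.length_replicate]
  by_cases hsp : t.head? = some ' '
  · obtain ⟨t', rfl⟩ : ∃ t', t = ' ' :: t' := by
      cases t with
      | nil => simp at hsp
      | cons c t' => exact ⟨t', by simpa using congrArg (fun o => o.getD 'x' :: t') hsp⟩
    have hsl : ∀ m : Nat, PySem.List.slice (List.replicate m '#' ++ ' ' :: t') (some (m : Int)) (some ((m : Int) + 1)) = [' '] := by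
      intro m
      rw [show ((m : Int) + 1) = ((m + 1 : Nat) : Int) by push_cast; ring]
      rw [PySem.List.slice_natCast]
      simp [List.drop_append_of_le_length]
    match n with
    | 0 =>
      rw [if_neg (fun h => absurd (b1.mp h).1 (by omega)),
          if_neg (fun h => absurd (b2.mp h).1 (by omega)),
          if_neg (fun h => absurd (b3.mp h).1 (by omega)),
          if_neg (fun h => absurd (b4.mp h).1 (by omega)),
          if_neg (by omega)]
      exact pvJoin_singleton _
    | 1 =>
      rw [if_pos (b1.mpr ⟨rfl, rfl⟩), if_pos ⟨by omega, by omega, hsl 1⟩]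
      rw [pvJoin_cons _ _ (by simp), pvJoin_singleton]
      simp [PySem.List.slice_from, PySem.List.pyRepeat]
    | 2 =>
      rw [if_neg (fun h => absurd (b1.mp h).1 (by omega)), if_pos (b2.mpr ⟨rfl, rfl⟩),
          if_pos ⟨by omega, by omega, hsl 2⟩]
      rw [pvJoin_cons _ _ (by simp), pvJoin_singleton]
      simp [PySem.List.slice_from, PySem.List.pyRepeat]
    | 3 =>
      rw [if_neg (fun h => absurd (b1.mp h).1 (by omega)),
          if_neg (fun h => absurd (b2.mp h).1 (by omega)), if_pos (b3.mpr ⟨rfl, rfl⟩),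
          if_pos ⟨by omega, by omega, hsl 3⟩]
      rw [pvJoin_cons _ _ (by simp), pvJoin_singleton]
      simp [PySem.List.slice_from, PySem.List.pyRepeat]
    | 4 =>
      rw [if_neg (fun h => absurd (b1.mp h).1 (by omega)),
          if_neg (fun h => absurd (b2.mp h).1 (by omega)),
          if_neg (fun h => absurd (b3.mp h).1 (by omega)), if_pos (b4.mpr ⟨rfl, rfl⟩),
          if_pos ⟨by omega, by omega, hsl 4⟩]
      rw [pvJoin_singleton]
      simp [PySem.List.slice_from]
    | (m + 5) =>
      rw [if_neg (fun h => absurd (b1.mp h).1 (by omega)),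
          if_neg (fun h => absurd (b2.mp h).1 (by omega)),
          if_neg (fun h => absurd (b3.mp h).1 (by omega)),
          if_neg (fun h => absurd (b4.mp h).1 (by omega)),
          if_neg (by omega)]
      exact pvJoin_singleton _
  · have hB : ¬ (1 ≤ n ∧ n ≤ 4 ∧
        PySem.List.slice (List.replicate n '#' ++ t) (some (n : Int)) (some ((n : Int) + 1)) = [' ']) := by
      rintro ⟨-, -, hget⟩
      apply hsp
      rw [show ((n : Int) + 1) = ((n + 1 : Nat) : Int) by push_cast; ring] at hget
      rw [PySem.List.slice_natCast] at hget
      cases t with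
      | nil => simp at hget
      | cons c t' =>
        simp [List.drop_append_of_le_length] at hget
        simp [hget]
    rw [if_neg (fun h => absurd (b1.mp h).2 hsp), if_neg (fun h => absurd (b2.mp h).2 hsp),
        if_neg (fun h => absurd (b3.mp h).2 hsp), if_neg (fun h => absurd (b4.mp h).2 hsp),
        if_neg hB]
    exact pvJoin_singleton _

lemma pvRender_eq_join (l : List Char) :
    pvRender l = PySem.Chars.join ['\n'] (pvProcLineA l) := by
  have h2 : (l.dropWhile (· == '#')).head? ≠ some '#' := by
    cases h : l.dropWhile (· == '#') with
    | nil => simp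
    | cons c t => simpa using pvDropWhile_head_ne l c t h
  conv_lhs => rw [pvLine_decomp l]
  conv_rhs => rw [pvLine_decomp l]
  exact (pvProc_aux _ _ h2).symm

-- pvSplitNL in line-at-a-time form
lemma pvSplitNL_no_nl (s : List Char) (h : s.dropWhile (· != '\n') = []) : pvSplitNL s = [s] := by
  induction s with
  | nil => rfl
  | cons c rest ih =>
    rw [List.dropWhile_cons] at h
    by_cases hc : c = '\n'
    · rw [if_neg (by simp [hc])] at h
      simp at h
    · rw [if_pos (by simp [hc])] at h
      rw [pvSplitNL, if_neg hc, ih h, pvConsHead]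
      simp

lemma pvSplitNL_step (s t : List Char) (c : Char) (h : s.dropWhile (· != '\n') = c :: t) :
    pvSplitNL s = s.takeWhile (· != '\n') :: pvSplitNL t := by
  induction s with
  | nil => simp at h
  | cons d rest ih =>
    rw [List.dropWhile_cons] at h
    by_cases hd : d = '\n'
    · subst hd
      rw [if_neg (by simp)] at h
      cases h
      simp [pvSplitNL, List.takeWhile_cons]
    · rw [if_pos (by simp [hd])] at h
      rw [pvSplitNL, if_neg hd, ih h, pvConsHead]
      rw [List.takeWhile_cons, if_pos (by simp [hd])]
      simp

-- the scanner loop computes the '\n'-join of the rendered lines, appended to the accumulator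
lemma pvAltGo_spec (rest out : List Char) :
    pvAltGo rest out = out ++ PySem.Chars.join ['\n'] ((pvSplitNL rest).map pvRender) := by
  induction hn : rest.length using Nat.strong_induction_on generalizing rest out with
  | _ n ih =>
    rw [pvAltGo]
    cases h : rest.dropWhile (· != '\n') with
    | nil =>
      rw [pvSplitNL_no_nl rest h]
      have : rest.takeWhile (· != '\n') = rest := by
        have := List.takeWhile_append_dropWhile (p := (· != '\n')) (l := rest)
        rw [h] at this; simpa using this
      rw [this]
      simp [pvJoin_singleton]
    | cons c t =>
      dsimp only
      rw [pvSplitNL_step rest t c h]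
      subst hn
      rw [ih t.length (pvDropWhile_cons_len h) t _ rfl]
      rw [List.map_cons, pvJoin_cons _ _ (by simpa using pvSplitNL_ne_nil t)]
      simp

-- ===== VERDICT (by name: the statement is the Claim_ definition above) =====
theorem process_headers_spec : Claim_equal_process_headers := by
  intro content _
  unfold Spec_process_headers process_headers process_headers_alt
  rw [pvAltGo_spec]
  simp only [List.nil_append]
  rw [show ("\n".toList : List Char) = ['\n'] by decide]
  rw [show (PySem.Chars.split? content.toList ['\n']).getD [] = PySem.Chars.splitOn content.toList ['\n'] by
        simp [PySem.Chars.split?]]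
  rw [pvSplitOn_eq, PySem.List.foldl_append_eq_flatMap, List.nil_append]
  rw [pvJoinFlat pvProcLineA (by intro l; unfold pvProcLineA; split_ifs <;> simp) _]
  congr 1
  congr 1
  apply List.map_congr_left
  intro l _
  exact (pvRender_eq_join l).symm
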